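-- pv_equiv track=rewrite | github.com/QuanDeFi/caxen | repo-analysis/src/symbols/indexer.py | split_top_level_alias
-- ===== SOURCE A (Python) =====
-- from typing import Callable, DefaultDict, Dict, Iterable, List, Optional, Sequence, Tuple
--
-- def split_top_level_alias(value: str) -> Tuple[str, Optional[str]]:
--     depth = 0
--     for index in range(len(value) - 1):
--         char = value[index]
--         if char == "{":
--             depth += 1
--         elif char == "}":
--             depth -= 1
--         elif depth == 0 and value[index : index + 4] == " as ":
--             return value[:index].strip(), value[index + 4 :].strip()
--     return value, None
-- ===== SOURCE B (Python) =====
-- def split_top_level_alias(value):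
--     pos = 0
--     while True:
--         idx = value.find(" as ", pos)
--         if idx == -1:
--             return value, None
--         prefix = value[:idx]
--         if prefix.count("{") == prefix.count("}"):
--             return value[:idx].strip(), value[idx + 4:].strip()
--         pos = idx + 1
-- ===== Notes on version B (the rewrite author's own statement) =====
-- stated objective: idiomatic
-- what changed: Replaces A's single character-by-character scan with a running brace-depth accumulator by repeated value.find(' as ', pos) candidate jumps, each candidate tested for top-level-ness by recounting '{' and '}' in its prefix.
import Mathlib
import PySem

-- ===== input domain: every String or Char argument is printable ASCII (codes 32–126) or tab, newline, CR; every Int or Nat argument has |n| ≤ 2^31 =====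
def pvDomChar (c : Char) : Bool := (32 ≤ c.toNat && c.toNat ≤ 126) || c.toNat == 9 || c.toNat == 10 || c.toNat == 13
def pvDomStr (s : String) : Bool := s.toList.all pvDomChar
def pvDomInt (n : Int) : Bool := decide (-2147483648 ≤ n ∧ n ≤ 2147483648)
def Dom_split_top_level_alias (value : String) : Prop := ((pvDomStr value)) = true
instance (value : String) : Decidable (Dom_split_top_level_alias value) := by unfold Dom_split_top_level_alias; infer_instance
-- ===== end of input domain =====

-- B replaces A's single scan with a running brace-depth counter by repeated str.find(" as ", pos)
-- candidates, each tested by recounting braces in the prefix (objective: idiomatic; same results).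

-- ===== PORT A =====
-- A's for-loop over range(len(value)-1) carrying the running depth counter; the early return is `some`.
-- gas is a plain totality fuel (one unit per index; gas = stop suffices, proved below, never reached exhausted).
-- value[index] is always in range here, so s.getD i ' ' is exact; value[index:index+4] = (s.drop i).take 4 (the slice clamps).
def pvA_loop (s : List Char) (stop : Nat) : Nat → Nat → Int → Option (String × Option String)
  | 0, _, _ => none
  | gas+1, i, depth =>
    if i < stop then
      if s.getD i ' ' = '{' then pvA_loop s stop gas (i+1) (depth+1)
      else if s.getD i ' ' = '}' then pvA_loop s stop gas (i+1) (depth-1)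
      else if depth = 0 ∧ (s.drop i).take 4 = " as ".toList then
        some (String.ofList (PySem.Chars.strip (s.take i)), some (String.ofList (PySem.Chars.strip (s.drop (i+4)))))
      else pvA_loop s stop gas (i+1) depth
    else none

def split_top_level_alias (value : String) : String × Option String :=
  let s := value.toList
  match pvA_loop s (s.length - 1) (s.length - 1) 0 0 with
  | some r => r
  | none => (value, none)

-- ===== PORT B =====
-- B's while-loop: value.find(" as ", pos); test the prefix by recounting its braces; else pos = idx+1.
-- gas is a plain totality fuel (each iteration moves pos strictly forward; gas = len+1 suffices, proved below).
def pvB_loop (value : String) : Nat → Nat → String × Option String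
  | 0, _ => (value, none)
  | gas+1, pos =>
    let idx := PySem.Chars.findFrom value.toList " as ".toList (pos : Int) none
    if idx = -1 then (value, none)
    else
      let i := idx.toNat
      let pre := value.toList.take i
      if PySem.Chars.count pre ['{'] = PySem.Chars.count pre ['}'] then
        (String.ofList (PySem.Chars.strip (value.toList.take i)), some (String.ofList (PySem.Chars.strip (value.toList.drop (i+4)))))
      else pvB_loop value gas (i+1)

def split_top_level_alias_alt (value : String) : String × Option String :=
  pvB_loop value (value.toList.length + 1) 0

-- ===== PRECONDITION & SPEC =====
def Spec_split_top_level_alias (value : String) (out : String × Option String) : Prop := out = split_top_level_alias_alt value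
instance (value : String) (out : String × Option String) : Decidable (Spec_split_top_level_alias value out) := by unfold Spec_split_top_level_alias; infer_instance

-- ===== CLAIM (what is proved, stated in full; the proofs are below) =====
def Claim_equal_split_top_level_alias : Prop := ∀ (value : String), Dom_split_top_level_alias value → Spec_split_top_level_alias value (split_top_level_alias value)

-- ===== LEMMAS AND PROOFS =====

-- the brace balance of a prefix (A's running depth)
def pvBal (s : List Char) : Int := (s.count '{' : Int) - (s.count '}' : Int)

theorem pvA_step (s : List Char) (stop gas i : Nat) (d : Int) (h : i < stop) :
    pvA_loop s stop (gas+1) i d =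
      if s.getD i ' ' = '{' then pvA_loop s stop gas (i+1) (d+1)
      else if s.getD i ' ' = '}' then pvA_loop s stop gas (i+1) (d-1)
      else if d = 0 ∧ (s.drop i).take 4 = " as ".toList then
        some (String.ofList (PySem.Chars.strip (s.take i)), some (String.ofList (PySem.Chars.strip (s.drop (i+4)))))
      else pvA_loop s stop gas (i+1) d := by
  rw [pvA_loop, if_pos h]

theorem pvBal_take_succ (s : List Char) (i : Nat) (hi : i < s.length) :
    pvBal (s.take (i+1)) = pvBal (s.take i) +
      (if s.getD i ' ' = '{' then 1 else 0) - (if s.getD i ' ' = '}' then 1 else 0) := by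
  have hget : s[i]? = some s[i] := List.getElem?_eq_getElem hi
  have hgd : s.getD i ' ' = s[i] := by simp [List.getD, hget]
  rw [List.take_add_one, hget, hgd]
  simp only [Option.toList_some]
  unfold pvBal
  rw [List.count_append, List.count_append]
  by_cases h1 : s[i] = '{' <;> by_cases h2 : s[i] = '}' <;> simp [h1, h2] <;> omega

theorem pvMatch_iff (s : List Char) (j : Nat) :
    ((s.drop j).take 4 = " as ".toList) ↔ (" as ".toList <+: s.drop j) := by
  constructor
  · intro h; rw [← h]; exact List.take_prefix _ _
  · intro h; exact (List.prefix_iff_eq_take.mp h).symm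

-- if " as " occurs nowhere at or after i, A's loop runs off the end
theorem pvA_none (s : List Char) (stop : Nat) : ∀ (gas i : Nat) (d : Int),
    (∀ j, i ≤ j → ¬ (" as ".toList <+: s.drop j)) → pvA_loop s stop gas i d = none := by
  intro gas
  induction gas with
  | zero => intro i d _; rfl
  | succ g ih =>
    intro i d h
    by_cases hlt : i < stop
    · rw [pvA_step s stop g i d hlt]
      have hm : ¬ (d = 0 ∧ (s.drop i).take 4 = " as ".toList) :=
        fun hc => h i le_rfl ((pvMatch_iff s i).mp hc.2)
      have h' : ∀ j, i + 1 ≤ j → ¬ (" as ".toList <+: s.drop j) := fun j hj => h j (by omega)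
      split_ifs with h1 h2
      · exact ih (i+1) (d+1) h'
      · exact ih (i+1) (d-1) h'
      · exact ih (i+1) d h'
    · rw [pvA_loop, if_neg hlt]

-- over a stretch with no " as " match, A's loop only updates its balance (and spends k - i gas)
theorem pvA_skip (s : List Char) (gas : Nat) : ∀ (n i k : Nat), k - i = n → i ≤ k → k ≤ s.length - 1 →
    (∀ j, i ≤ j → j < k → ¬ (" as ".toList <+: s.drop j)) →
    pvA_loop s (s.length - 1) (gas + n) i (pvBal (s.take i)) =
      pvA_loop s (s.length - 1) gas k (pvBal (s.take k)) := by
  intro n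
  induction n generalizing gas with
  | zero =>
    intro i k hn hik _ _
    have : i = k := by omega
    subst this
    rfl
  | succ m ih =>
    intro i k hn hik hk hnone
    have hlt : i < k := by omega
    have hilen : i < s.length := by omega
    have hstep := pvBal_take_succ s i hilen
    have hm : ¬ (pvBal (s.take i) = 0 ∧ (s.drop i).take 4 = " as ".toList) :=
      fun hc => hnone i le_rfl hlt ((pvMatch_iff s i).mp hc.2)
    have hrec : pvA_loop s (s.length - 1) (gas + m) (i+1) (pvBal (s.take (i+1))) =
        pvA_loop s (s.length - 1) gas k (pvBal (s.take k)) :=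
      ih gas (i+1) k (by omega) (by omega) hk (fun j hj hjk => hnone j (by omega) hjk)
    rw [← hrec]
    rw [show gas + (m + 1) = (gas + m) + 1 from rfl]
    rw [pvA_step s (s.length - 1) (gas + m) i (pvBal (s.take i)) (by omega)]
    split_ifs with h1 h2
    · rw [h1] at hstep; simp at hstep; rw [hstep]
    · rw [h2] at hstep; simp at hstep; rw [hstep]
    · simp only [List.getD] at h1 h2
      simp [h1, h2] at hstep; rw [hstep]

-- PySem.Chars.count with a one-character needle is List.count
theorem pvCountGo_single (c : Char) : ∀ (l : List Char) (fuel acc : Nat), l.length ≤ fuel →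
    PySem.Chars.count.go [c] fuel l acc = acc + l.count c := by
  intro l
  induction l with
  | nil => intro fuel acc _; cases fuel <;> simp [PySem.Chars.count.go]
  | cons a t ih =>
    intro fuel acc hf
    cases fuel with
    | zero => simp at hf
    | succ n =>
      by_cases hc : a = c
      · subst hc
        simp only [PySem.Chars.count.go, List.isPrefixOf, beq_self_eq_true, Bool.true_and,
          if_true, List.length_singleton, List.drop_one, List.tail_cons]
        rw [ih n (acc + 1) (by simpa using hf)]
        simp
        omega
      · have hpf : [c].isPrefixOf (a :: t) = false := by
          simp [List.isPrefixOf]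
          exact fun h => absurd h.symm hc
        simp only [PySem.Chars.count.go, hpf, Bool.false_eq_true, if_false]
        rw [ih n acc (by simpa using hf)]
        simp [hc]

theorem pvCount_single (l : List Char) (c : Char) : PySem.Chars.count l [c] = l.count c := by
  simp [PySem.Chars.count, pvCountGo_single c l l.length 0 le_rfl]

-- a found " as " index lies at or after pos and 4 before the end
theorem pvB_found (s : List Char) (pos : Nat) (hpos : pos ≤ s.length)
    (h : PySem.Chars.findFrom s " as ".toList (pos : Int) none ≠ -1) :
    pos ≤ (PySem.Chars.findFrom s " as ".toList (pos : Int) none).toNat ∧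
    (PySem.Chars.findFrom s " as ".toList (pos : Int) none).toNat + 4 ≤ s.length := by
  obtain ⟨h1, h2, -⟩ := PySem.Chars.findFrom_natCast_spec s " as ".toList pos hpos h
  have h4 := h2.length_le
  rw [List.length_drop] at h4
  have h5 : (" as ".toList).length = 4 := rfl
  omega

-- main correspondence: B's find-loop from pos equals A's scan from pos carrying the prefix balance
theorem pvMain (value : String) : ∀ (gasB pos : Nat), pos ≤ value.toList.length →
    value.toList.length + 1 - pos ≤ gasB →
    pvB_loop value gasB pos =
      match pvA_loop value.toList (value.toList.length - 1) (value.toList.length - 1 - pos) pos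
          (pvBal (value.toList.take pos)) with
      | some r => r
      | none => (value, none) := by
  intro gasB
  induction gasB with
  | zero => intro pos hpos hgas; omega
  | succ g ih =>
    intro pos hpos hgas
    rw [pvB_loop]
    by_cases hfound : PySem.Chars.findFrom value.toList " as ".toList (pos : Int) none = -1
    · rw [if_pos hfound]
      have hno : ¬ (" as ".toList <:+: value.toList.drop pos) :=
        (PySem.Chars.findFrom_natCast_eq_neg_one_iff value.toList " as ".toList pos hpos).mp hfound
      have h : ∀ j, pos ≤ j → ¬ (" as ".toList <+: value.toList.drop j) := by
        intro j hj hpre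
        apply hno
        have hdd : value.toList.drop j = (value.toList.drop pos).drop (j - pos) := by
          rw [List.drop_drop]; congr 1; omega
        rw [hdd] at hpre
        exact hpre.isInfix.trans (List.drop_suffix _ _).isInfix
      rw [pvA_none value.toList _ _ pos _ h]
    · rw [if_neg hfound]
      obtain ⟨hle, hpre, hmin⟩ :=
        PySem.Chars.findFrom_natCast_spec value.toList " as ".toList pos hpos hfound
      obtain ⟨hple, hilen⟩ := pvB_found value.toList pos hpos hfound
      set i := (PySem.Chars.findFrom value.toList " as ".toList (pos : Int) none).toNat with hi
      have hskip := pvA_skip value.toList (value.toList.length - 1 - i) (i - pos) pos i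
        (by omega) hple (by omega) (fun j hj hjk => hmin j hj hjk)
      rw [show value.toList.length - 1 - pos = value.toList.length - 1 - i + (i - pos) from by omega,
        hskip]
      obtain ⟨t, ht⟩ := hpre
      have hsp : value.toList.getD i ' ' = ' ' := by
        have h0 : value.toList[i]? = some ' ' := by
          have h00 : (value.toList.drop i)[0]? = some ' ' := by rw [← ht]; rfl
          rwa [List.getElem?_drop, Nat.add_zero] at h00
        simp [List.getD, h0]
      have htake : (value.toList.drop i).take 4 = " as ".toList :=
        (pvMatch_iff value.toList i).mpr ⟨t, ht⟩
      rw [show value.toList.length - 1 - i = (value.toList.length - 1 - (i+1)) + 1 from by omega]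
      rw [pvA_step value.toList (value.toList.length - 1) (value.toList.length - 1 - (i+1)) i _
        (by omega), hsp]
      rw [if_neg (show ¬ (' ' = '{') by decide), if_neg (show ¬ (' ' = '}') by decide)]
      have hcnt : (PySem.Chars.count (value.toList.take i) ['{'] =
          PySem.Chars.count (value.toList.take i) ['}']) ↔ pvBal (value.toList.take i) = 0 := by
        rw [pvCount_single, pvCount_single, pvBal]
        omega
      by_cases hbal : pvBal (value.toList.take i) = 0
      · rw [if_pos (⟨hbal, htake⟩ : _ ∧ _), if_pos (hcnt.mpr hbal)]
      · rw [if_neg (fun hc => hbal (And.left hc)), if_neg (fun hc => hbal (hcnt.mp hc))]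
        have hbalstep : pvBal (value.toList.take (i+1)) = pvBal (value.toList.take i) := by
          rw [pvBal_take_succ value.toList i (by omega), hsp]
          simp
        rw [← hbalstep]
        exact ih (i+1) (by omega) (by omega)

-- ===== VERDICT (by name: the statement is the Claim_ definition above) =====
theorem split_top_level_alias_spec : Claim_equal_split_top_level_alias := by
  intro value _
  unfold Spec_split_top_level_alias split_top_level_alias split_top_level_alias_alt
  rw [pvMain value (value.toList.length + 1) 0 (Nat.zero_le _) (by omega),
    show pvBal (value.toList.take 0) = 0 from rfl]
  rfl
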